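-- pv_equiv track=rewrite | github.com/KevinHou03/Leetcode | Leetcode_544.py | findContestMatch
-- ===== SOURCE A (Python) =====
-- def findContestMatch(n):
--     """
--     :type n: int
--     :rtype: str
--     1,2,3,4,5,6,7,8 - 8
--     18 27 36 45 - 4
--     1845 2736  - 2
--     18452736 - 1
--
--     """
--
--     team_match = [str(i) for i in range(1,n+1)]
--     while len(team_match) > 1:
--         round = []
--         for i in range(len(team_match) // 2):
--             new_match = f'({team_match[i]}, {team_match[- i - 1]})'
--             round.append(new_match)
--         team_match = round # 要及时更新
--     return team_match[0]
-- ===== SOURCE B (Python) =====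
-- def findContestMatch(n):
--     def rounds(lst):
--         if len(lst) <= 1:
--             return lst[0]
--         half = len(lst) // 2
--         return rounds([f'({a}, {b})' for a, b in zip(lst[:half], reversed(lst))])
--     return rounds([str(i) for i in range(1, n + 1)])
-- ===== Notes on version B (the rewrite author's own statement) =====
-- stated objective: simpler
-- what changed: Replaces the while loop with index arithmetic (team_match[i], team_match[-i-1]) by a recursive helper that pairs via zip(lst[:half], reversed(lst)), no explicit indices or accumulator list.
import Mathlib
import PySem

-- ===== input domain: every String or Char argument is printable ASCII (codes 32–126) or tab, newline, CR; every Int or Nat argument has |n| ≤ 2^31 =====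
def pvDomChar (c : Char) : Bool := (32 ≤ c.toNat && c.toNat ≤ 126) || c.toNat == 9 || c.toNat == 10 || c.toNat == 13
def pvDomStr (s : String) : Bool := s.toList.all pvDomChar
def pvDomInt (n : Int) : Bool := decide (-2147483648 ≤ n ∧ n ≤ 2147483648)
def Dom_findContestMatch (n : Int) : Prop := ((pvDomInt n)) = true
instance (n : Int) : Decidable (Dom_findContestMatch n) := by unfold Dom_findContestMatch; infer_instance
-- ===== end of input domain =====

-- B replaces A's while loop with explicit index arithmetic by a recursion pairing via zip of
-- the first half with the reversed list (objective: simpler). Return-value equivalence only.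

-- ===== PORT A =====
-- one round of A's while-loop body: for i in range(len//2): append f'({tm[i]}, {tm[-i-1]})'
def fcmRound (l : List String) : List String :=
  (PySem.List.pyRange 0 (PySem.Int.floordiv (l.length : Int) 2) 1).foldl
    (fun acc i =>
      acc ++ ["(" ++ PySem.List.pyGetD l i "" ++ ", " ++ PySem.List.pyGetD l (-i - 1) "" ++ ")"]) []

theorem fcmRound_length (l : List String) : (fcmRound l).length = l.length / 2 := by
  unfold fcmRound
  rw [PySem.List.foldl_append_singleton_eq_map,
    show PySem.Int.floordiv (l.length : Int) 2 = ((l.length / 2 : Nat) : Int) from by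
      exact_mod_cast PySem.Int.floordiv_natCast l.length 2]
  simp [PySem.List.length_pyRange_one]
  omega

-- the while loop of A
def fcmLoop (l : List String) : String :=
  if 1 < l.length then fcmLoop (fcmRound l)
  else PySem.List.pyGetD l 0 ""
termination_by l.length
decreasing_by rw [fcmRound_length]; omega

def findContestMatch (n : Int) : String :=
  fcmLoop ((PySem.List.pyRange 1 (n + 1) 1).map PySem.Int.toStr)

-- ===== PORT B =====
-- B's recursive helper: pair zip(lst[:half], reversed(lst)) and recurse
def fcmRounds (l : List String) : String :=
  if l.length ≤ 1 then PySem.List.pyGetD l 0 ""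
  else
    fcmRounds (((l.take (l.length / 2)).zip l.reverse).map
      (fun p => "(" ++ p.1 ++ ", " ++ p.2 ++ ")"))
termination_by l.length
decreasing_by simp; omega

def findContestMatch_alt (n : Int) : String :=
  fcmRounds ((PySem.List.pyRange 1 (n + 1) 1).map PySem.Int.toStr)

-- ===== PRECONDITION & SPEC =====
-- A raises IndexError (team_match[0] on the empty list) for n ≤ 0; those inputs are excluded.
def Pre_findContestMatch (n : Int) : Prop := 1 ≤ n
instance (n : Int) : Decidable (Pre_findContestMatch n) := by unfold Pre_findContestMatch; infer_instance
def pvWitness_findContestMatch : Int := (5)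

def Spec_findContestMatch (n : Int) (out : String) : Prop := out = findContestMatch_alt n
instance (n : Int) (out : String) : Decidable (Spec_findContestMatch n out) := by unfold Spec_findContestMatch; infer_instance

-- ===== CLAIM (what is proved, stated in full; the proofs are below) =====
def Claim_equal_findContestMatch : Prop := ∀ (n : Int), Dom_findContestMatch n → Pre_findContestMatch n → Spec_findContestMatch n (findContestMatch n)

-- ===== LEMMAS AND PROOFS =====
theorem fcmRound_eq_zip (l : List String) :
    fcmRound l = ((l.take (l.length / 2)).zip l.reverse).map
      (fun p => "(" ++ p.1 ++ ", " ++ p.2 ++ ")") := by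
  unfold fcmRound
  rw [PySem.List.foldl_append_singleton_eq_map,
    show PySem.Int.floordiv (l.length : Int) 2 = ((l.length / 2 : Nat) : Int) from by
      exact_mod_cast PySem.Int.floordiv_natCast l.length 2]
  apply List.ext_getElem
  · simp [PySem.List.length_pyRange_one]; omega
  intro i h1 h2
  have hlen : l.length / 2 ≤ l.length := Nat.div_le_self _ _
  have hi : i < l.length / 2 := by
    rw [List.length_map, List.length_zip, List.length_take, List.length_reverse] at h2; omega
  have hil : i < l.length := lt_of_lt_of_le hi hlen
  simp only [PySem.List.pyRange_zero_nat]
  have e2 : (-((i : Nat) : Int) - 1) = -(((i + 1 : Nat)) : Int) := by push_cast; ring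
  simp only [List.nil_append, List.map_map, List.getElem_map, List.getElem_range,
    List.getElem_zip, List.getElem_take, List.getElem_reverse, Function.comp]
  rw [e2, PySem.List.pyGetD_neg_natCast _ _ _ (by omega) (by omega),
    PySem.List.pyGetD_natCast]
  have : l.length - 1 - i = l.length - (i + 1) := by omega
  simp [List.getD_eq_getElem?_getD, List.getElem?_eq_getElem hil, this]

theorem fcmLoop_eq_fcmRounds (l : List String) : fcmLoop l = fcmRounds l := by
  rw [fcmLoop, fcmRounds]
  by_cases h : 1 < l.length
  · rw [if_pos h, if_neg (by omega : ¬ l.length ≤ 1), fcmRound_eq_zip]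
    exact fcmLoop_eq_fcmRounds _
  · rw [if_neg h, if_pos (by omega : l.length ≤ 1)]
termination_by l.length
decreasing_by simp; omega

-- ===== VERDICT (by name: the statement is the Claim_ definition above) =====
theorem findContestMatch_spec : Claim_equal_findContestMatch := by
  intro n _ _
  unfold Spec_findContestMatch findContestMatch findContestMatch_alt
  exact fcmLoop_eq_fcmRounds _
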